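-- pv_equiv track=rewrite | github.com/ChoiBeomJun99/FinancialDevCT | 20231007/JeonghyunLEE/Algorithm_CH.py | solution
-- ===== SOURCE A (Python) =====
-- def m_time(m):
--     return 60 * abs(int(m[0].split(":")[0]) - int(m[1].split(":")[0])) + abs(int(m[0].split(":")[1]) - int(m[1].split(":")[1]))
--
-- def sub_sharp(m):
--     return m.replace('C#', 'c').replace('D#', 'd').replace('F#', 'f').replace('G#', 'g').replace('A#', 'a')
--
-- def solution(m, musicinfos):
--     answer = []
--     cnt = 0
--     song = dict()
--     m = sub_sharp(m)
--
--     for i in range(len(musicinfos)):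
--         x = musicinfos[i].split(",")
--         # musicinfos안의 #코드 대치
--         x[3] = sub_sharp(x[3])
--         #재생된 시간
--         if m_time(x) > len(x[3]): # 길 때
--             song[(x[3] * (m_time(x) // len(x[3])) + x[3][:m_time(x)%len(x[3])])] = [x[2], m_time(x)]
--         else: # 짧거나 같을 때
--             song[x[3][:m_time(x)]] = [x[2], m_time(x)]
--
--     # 음악이 키 안에 존재할 때, [음악명, 재생시간, cnt(입력순서)]
--     for s in song.keys():
--         if m in s:
--             answer.append([song[s][0],song[s][1], cnt])
--         cnt += 1
--
--     # 재생시간 내림차순, 입력된 순서 오름차순 정렬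
--     answer.sort(key = lambda x: (-x[1], x[0]))
--     # 반환
--     if answer:
--         return answer[0][0]
--     else:
--         return '(None)'
-- ===== SOURCE B (Python) =====
-- def sub_sharp(m):
--     return m.replace('C#', 'c').replace('D#', 'd').replace('F#', 'f').replace('G#', 'g').replace('A#', 'a')
--
-- def solution(m, musicinfos):
--     target = sub_sharp(m)
--     song = dict()
--     for info in musicinfos:
--         fields = info.split(",")
--         start, end, title = fields[0], fields[1], fields[2]
--         mel = sub_sharp(fields[3])
--         sh, sm = start.split(":")[:2]
--         eh, em = end.split(":")[:2]
--         t = 60 * abs(int(sh) - int(eh)) + abs(int(sm) - int(em))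
--         played = (mel * (t // len(mel) + 1))[:t] if mel else ''
--         song[played] = (title, t)
--     best = None
--     for played, (title, t) in song.items():
--         if target in played:
--             if best is None or t > best[1] or (t == best[1] and title < best[0]):
--                 best = (title, t)
--     return best[0] if best is not None else '(None)'
-- ===== Notes on version B (the rewrite author's own statement) =====
-- stated objective: simpler
-- what changed: B replaces A's collect-matches-into-a-list-then-sort-by-(-time,title)-and-take-head selection by a single linear best-so-far scan over the dict items, and builds each played string with one repeat-and-truncate formula (mel*(t//len+1))[:t] instead of A's two-branch quotient-concatenation/remainder-slice construction; the dict-building pass is kept (its last-write-wins semantics is essential).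
import Mathlib
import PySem

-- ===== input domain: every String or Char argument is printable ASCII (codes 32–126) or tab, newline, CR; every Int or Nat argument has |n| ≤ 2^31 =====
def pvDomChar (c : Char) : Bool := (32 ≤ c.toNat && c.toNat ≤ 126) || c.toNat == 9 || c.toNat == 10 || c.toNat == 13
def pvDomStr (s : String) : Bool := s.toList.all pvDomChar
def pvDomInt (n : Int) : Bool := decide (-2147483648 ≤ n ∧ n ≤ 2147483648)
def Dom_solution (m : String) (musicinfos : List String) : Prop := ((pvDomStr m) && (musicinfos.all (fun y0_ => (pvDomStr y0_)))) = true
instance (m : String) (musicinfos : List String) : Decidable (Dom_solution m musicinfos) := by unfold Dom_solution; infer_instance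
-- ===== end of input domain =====

-- B replaces A's append-all-matches-then-sort-by-(-time,title) selection by a single linear
-- scan over the dict items keeping the current best (time desc, title asc), and builds the
-- played string by one repeat-and-truncate formula instead of A's two-branch quotient/remainder
-- concatenation; objective: simpler (the dict-building pass over musicinfos is necessarily similar).

-- ===== PORT A =====
-- helper sub_sharp of A (shared text with B, both Pythons use the identical replace chain)
def subSharpC (s : List Char) : List Char :=
  PySem.Chars.replace (PySem.Chars.replace (PySem.Chars.replace (PySem.Chars.replace
    (PySem.Chars.replace s "C#".toList "c".toList) "D#".toList "d".toList)
    "F#".toList "f".toList) "G#".toList "g".toList) "A#".toList "a".toList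

-- helper m_time of A: 60*abs(h0-h1)+abs(mn0-mn1); none where the Python raises
def mTimeA (x : List (List Char)) : Option Int :=
  match PySem.List.pyGet? x 0 with
  | none => none
  | some m0 =>
    match PySem.List.pyGet? x 1 with
    | none => none
    | some m1 =>
      match PySem.List.pyGet? (PySem.Chars.splitOn m0 ":".toList) 0 with
      | none => none
      | some a0 =>
        match PySem.Int.ofChars? a0 with
        | none => none
        | some h0 =>
          match PySem.List.pyGet? (PySem.Chars.splitOn m1 ":".toList) 0 with
          | none => none
          | some b0 =>
            match PySem.Int.ofChars? b0 with
            | none => none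
            | some h1 =>
              match PySem.List.pyGet? (PySem.Chars.splitOn m0 ":".toList) 1 with
              | none => none
              | some a1 =>
                match PySem.Int.ofChars? a1 with
                | none => none
                | some mn0 =>
                  match PySem.List.pyGet? (PySem.Chars.splitOn m1 ":".toList) 1 with
                  | none => none
                  | some b1 =>
                    match PySem.Int.ofChars? b1 with
                    | none => none
                    | some mn1 => some (60 * |h0 - h1| + |mn0 - mn1|)

-- A's loop body over musicinfos (none = the Python raises there)
def stepA (acc : Option (PySem.Dict (List Char) (List Char × Int))) (info : String) :
    Option (PySem.Dict (List Char) (List Char × Int)) :=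
  match acc with
  | none => none
  | some song =>
    let x := PySem.Chars.splitOn info.toList ",".toList
    match PySem.List.pyGet? x 3 with
    | none => none
    | some f3 =>
      let x := PySem.List.pySetD x 3 (subSharpC f3)
      match mTimeA x with
      | none => none
      | some t =>
        let mel := PySem.List.pyGetD x 3 []
        let title := PySem.List.pyGetD x 2 []
        if t > PySem.List.len mel then
          match PySem.Int.floordiv? t (PySem.List.len mel), PySem.Int.mod? t (PySem.List.len mel) with
          | some q, some r =>
            some (song.insert (PySem.List.pyRepeat mel q ++ PySem.List.slice mel none (some r)) (title, t))
          | _, _ => none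
        else
          some (song.insert (PySem.List.slice mel none (some t)) (title, t))

def solution (m : String) (musicinfos : List String) : String :=
  let mC := subSharpC m.toList
  match musicinfos.foldl stepA (some PySem.Dict.empty) with
  | none => "(None)"  -- unreachable under Pre_solution: the Python raises on these inputs
  | some song =>
    let answer := (song.keys.foldl
      (fun (st : List (List Char × Int × Int) × Int) s =>
        (if PySem.Chars.isIn mC s then
            st.1 ++ [((song.getD s ([], 0)).1, (song.getD s ([], 0)).2, st.2)]
          else st.1, st.2 + 1)) ([], 0)).1
    match PySem.List.sorted2 answer (fun e => -(e.2.1)) (fun e => e.1) with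
    | [] => "(None)"
    | e :: _ => String.ofList e.1

-- ===== PORT B =====
def stepB (acc : Option (PySem.Dict (List Char) (List Char × Int))) (info : String) :
    Option (PySem.Dict (List Char) (List Char × Int)) :=
  match acc with
  | none => none
  | some song =>
    let fields := PySem.Chars.splitOn info.toList ",".toList
    match PySem.List.pyGet? fields 0, PySem.List.pyGet? fields 1, PySem.List.pyGet? fields 2 with
    | some start, some stop, some title =>
      match PySem.List.pyGet? fields 3 with
      | none => none
      | some f3 =>
        let mel := subSharpC f3
        match PySem.List.slice (PySem.Chars.splitOn start ":".toList) none (some 2) with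
        | [sh, sm] =>
          match PySem.List.slice (PySem.Chars.splitOn stop ":".toList) none (some 2) with
          | [eh, em] =>
            match PySem.Int.ofChars? sh, PySem.Int.ofChars? eh,
                  PySem.Int.ofChars? sm, PySem.Int.ofChars? em with
            | some a, some b, some c, some d =>
              let t := 60 * |a - b| + |c - d|
              let played :=
                if mel ≠ [] then
                  PySem.List.slice
                    (PySem.List.pyRepeat mel (PySem.Int.floordiv t (PySem.List.len mel) + 1))
                    none (some t)
                else []
              some (song.insert played (title, t))
            | _, _, _, _ => none
          | _ => none
        | _ => none
    | _, _, _ => none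

def solution_alt (m : String) (musicinfos : List String) : String :=
  let target := subSharpC m.toList
  match musicinfos.foldl stepB (some PySem.Dict.empty) with
  | none => "(None)"  -- unreachable under Pre_solution
  | some song =>
    let best := song.items.foldl
      (fun (b : Option (List Char × Int)) p =>
        if PySem.Chars.isIn target p.1 then
          match b with
          | none => some p.2
          | some h => if h.2 < p.2.2 ∨ (p.2.2 = h.2 ∧ p.2.1 < h.1) then some p.2 else some h
        else b) none
    match best with
    | none => "(None)"
    | some v => String.ofList v.1

-- ===== PRECONDITION & SPEC =====
-- helpers used by Pre_solution (reader-checkable parse conditions; not the ports)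
def pvF (x : List (List Char)) (i j : Nat) : Option Int :=
  PySem.Int.ofChars? ((PySem.Chars.splitOn (x.getD i []) ":".toList).getD j [])
def pvT (x : List (List Char)) : Int :=
  60 * |(pvF x 0 0).getD 0 - (pvF x 1 0).getD 0| + |(pvF x 0 1).getD 0 - (pvF x 1 1).getD 0|

-- Pre_solution: exactly the inputs on which the Python A returns normally — every musicinfo has
-- at least 4 comma fields, both time fields split on ':' into at least two int()-parsable parts,
-- and the sharp-substituted melody is nonempty unless the played time is 0 (otherwise A raises
-- IndexError/ValueError/ZeroDivisionError).
def Pre_solution (m : String) (musicinfos : List String) : Prop :=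
  ∀ info ∈ musicinfos,
    4 ≤ (PySem.Chars.splitOn info.toList ",".toList).length ∧
    2 ≤ (PySem.Chars.splitOn ((PySem.Chars.splitOn info.toList ",".toList).getD 0 []) ":".toList).length ∧
    2 ≤ (PySem.Chars.splitOn ((PySem.Chars.splitOn info.toList ",".toList).getD 1 []) ":".toList).length ∧
    (pvF (PySem.Chars.splitOn info.toList ",".toList) 0 0).isSome ∧
    (pvF (PySem.Chars.splitOn info.toList ",".toList) 0 1).isSome ∧
    (pvF (PySem.Chars.splitOn info.toList ",".toList) 1 0).isSome ∧
    (pvF (PySem.Chars.splitOn info.toList ",".toList) 1 1).isSome ∧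
    (subSharpC ((PySem.Chars.splitOn info.toList ",".toList).getD 3 []) ≠ [] ∨
      pvT (PySem.Chars.splitOn info.toList ",".toList) = 0)
instance (m : String) (musicinfos : List String) : Decidable (Pre_solution m musicinfos) := by
  unfold Pre_solution; infer_instance

def pvWitness_solution : String × List String :=
  ("C#C", ["12:00,12:14,HELLO,C#DEFGAB", "13:00,13:05,WORLD,ABC"])

def Spec_solution (m : String) (musicinfos : List String) (out : String) : Prop := out = solution_alt m musicinfos
instance (m : String) (musicinfos : List String) (out : String) : Decidable (Spec_solution m musicinfos out) := by unfold Spec_solution; infer_instance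

-- ===== CLAIM (what is proved, stated in full; the proofs are below) =====
def Claim_equal_solution : Prop := ∀ (m : String) (musicinfos : List String), Dom_solution m musicinfos → Pre_solution m musicinfos → Spec_solution m musicinfos (solution m musicinfos)

-- ===== LEMMAS AND PROOFS =====

-- the common total step both loops reduce to under Pre_solution
def keyOf (info : String) : List Char :=
  let x := PySem.Chars.splitOn info.toList ",".toList
  let mel := subSharpC (x.getD 3 [])
  if mel ≠ [] then
    PySem.List.slice (PySem.List.pyRepeat mel (PySem.Int.floordiv (pvT x) (PySem.List.len mel) + 1))
      none (some (pvT x))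
  else []
def valOf (info : String) : List Char × Int :=
  ((PySem.Chars.splitOn info.toList ",".toList).getD 2 [], pvT (PySem.Chars.splitOn info.toList ",".toList))
def stepT (d : PySem.Dict (List Char) (List Char × Int)) (info : String) :
    PySem.Dict (List Char) (List Char × Int) :=
  d.insert (keyOf info) (valOf info)

-- per-info precondition (the conjunct of Pre_solution)
def PreInfo (info : String) : Prop :=
  4 ≤ (PySem.Chars.splitOn info.toList ",".toList).length ∧
  2 ≤ (PySem.Chars.splitOn ((PySem.Chars.splitOn info.toList ",".toList).getD 0 []) ":".toList).length ∧
  2 ≤ (PySem.Chars.splitOn ((PySem.Chars.splitOn info.toList ",".toList).getD 1 []) ":".toList).length ∧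
  (pvF (PySem.Chars.splitOn info.toList ",".toList) 0 0).isSome ∧
  (pvF (PySem.Chars.splitOn info.toList ",".toList) 0 1).isSome ∧
  (pvF (PySem.Chars.splitOn info.toList ",".toList) 1 0).isSome ∧
  (pvF (PySem.Chars.splitOn info.toList ",".toList) 1 1).isSome ∧
  (subSharpC ((PySem.Chars.splitOn info.toList ",".toList).getD 3 []) ≠ [] ∨
    pvT (PySem.Chars.splitOn info.toList ",".toList) = 0)

theorem pvT_nonneg (x : List (List Char)) : 0 ≤ pvT x := by
  unfold pvT
  have h1 := abs_nonneg ((pvF x 0 0).getD 0 - (pvF x 1 0).getD 0)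
  have h2 := abs_nonneg ((pvF x 0 1).getD 0 - (pvF x 1 1).getD 0)
  nlinarith

-- a fold of an exception-propagating step whose steps all succeed
theorem foldl_option_some {σ α : Type} (step : Option σ → α → Option σ) (f : σ → α → σ)
    (xs : List α) (h : ∀ x ∈ xs, ∀ d, step (some d) x = some (f d x)) (d0 : σ) :
    xs.foldl step (some d0) = some (xs.foldl f d0) := by
  induction xs generalizing d0 with
  | nil => rfl
  | cons x xs ih =>
    simp only [List.foldl_cons, h x (by simp)]
    exact ih (fun y hy d => h y (by simp [hy]) d) _

theorem getElem?_getD {α : Type} (xs : List α) (n : Nat) (d : α) (h : n < xs.length) :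
    xs[n]? = some (xs.getD n d) := by
  rw [List.getElem?_eq_getElem h, List.getD_eq_getElem xs d h]

theorem mTimeA_eq (x : List (List Char)) (hx : 2 ≤ x.length)
    (h0 : 2 ≤ (PySem.Chars.splitOn (x.getD 0 []) ":".toList).length)
    (h1 : 2 ≤ (PySem.Chars.splitOn (x.getD 1 []) ":".toList).length)
    (s00 : (pvF x 0 0).isSome) (s01 : (pvF x 0 1).isSome)
    (s10 : (pvF x 1 0).isSome) (s11 : (pvF x 1 1).isSome) :
    mTimeA x = some (pvT x) := by
  obtain ⟨a00, e00⟩ := Option.isSome_iff_exists.mp s00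
  obtain ⟨a01, e01⟩ := Option.isSome_iff_exists.mp s01
  obtain ⟨a10, e10⟩ := Option.isSome_iff_exists.mp s10
  obtain ⟨a11, e11⟩ := Option.isSome_iff_exists.mp s11
  unfold pvF at e00 e01 e10 e11
  have c0 : (0 : Int) = ((0 : Nat) : Int) := rfl
  have c1 : (1 : Int) = ((1 : Nat) : Int) := rfl
  have gx0 : x[(0:Nat)]? = some (x.getD 0 []) := getElem?_getD x 0 [] (by omega)
  have gx1 : x[(1:Nat)]? = some (x.getD 1 []) := getElem?_getD x 1 [] (by omega)
  have gs00 : (PySem.Chars.splitOn (x.getD 0 []) ":".toList)[(0:Nat)]? =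
      some ((PySem.Chars.splitOn (x.getD 0 []) ":".toList).getD 0 []) :=
    getElem?_getD _ 0 [] (by omega)
  have gs01 : (PySem.Chars.splitOn (x.getD 0 []) ":".toList)[(1:Nat)]? =
      some ((PySem.Chars.splitOn (x.getD 0 []) ":".toList).getD 1 []) :=
    getElem?_getD _ 1 [] (by omega)
  have gs10 : (PySem.Chars.splitOn (x.getD 1 []) ":".toList)[(0:Nat)]? =
      some ((PySem.Chars.splitOn (x.getD 1 []) ":".toList).getD 0 []) :=
    getElem?_getD _ 0 [] (by omega)
  have gs11 : (PySem.Chars.splitOn (x.getD 1 []) ":".toList)[(1:Nat)]? =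
      some ((PySem.Chars.splitOn (x.getD 1 []) ":".toList).getD 1 []) :=
    getElem?_getD _ 1 [] (by omega)
  simp only [mTimeA, c0, c1, PySem.List.pyGet?_natCast, gx0, gx1, gs00, gs01, gs10, gs11,
    e00, e01, e10, e11]
  simp only [pvT, pvF, e00, e01, e10, e11, Option.getD_some]

-- the played-string identity: one repeat-and-truncate equals A's two-branch construction
theorem length_flatten_replicate {α : Type} (q : Nat) (mel : List α) :
    ((List.replicate q mel).flatten).length = q * mel.length := by
  induction q with
  | zero => simp
  | succ n ih => simp [List.replicate_succ, ih, Nat.succ_mul, Nat.add_comm]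

theorem played_nat (mel : List Char) (T : Nat) (hL : 0 < mel.length) :
    ((List.replicate (T / mel.length + 1) mel).flatten).take T =
    if mel.length < T then
      (List.replicate (T / mel.length) mel).flatten ++ mel.take (T % mel.length)
    else mel.take T := by
  have hdm := Nat.div_add_mod T mel.length
  have hdm' : T / mel.length * mel.length + T % mel.length = T := by
    rw [Nat.mul_comm]; exact hdm
  have hflat := length_flatten_replicate (T / mel.length) mel
  by_cases h : mel.length < T
  · rw [if_pos h, List.replicate_succ', List.flatten_append, List.take_append,
        List.take_of_length_le (by rw [hflat]; exact Nat.div_mul_le_self T mel.length)]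
    simp only [List.flatten_cons, List.flatten_nil, List.append_nil]
    congr 1
    rw [hflat]
    congr 1
    generalize hQ : T / mel.length * mel.length = Q at hdm' ⊢
    generalize hR : T % mel.length = R at hdm' ⊢
    omega
  · rw [if_neg h, List.replicate_succ, List.flatten_cons,
        List.take_append_of_le_length (by omega)]

theorem played_eq (mel : List Char) (t : Int) (hm : mel ≠ []) (ht : 0 ≤ t) :
    PySem.List.slice (PySem.List.pyRepeat mel (PySem.Int.floordiv t (PySem.List.len mel) + 1))
      none (some t) =
    if t > PySem.List.len mel then
      PySem.List.pyRepeat mel (PySem.Int.floordiv t (PySem.List.len mel)) ++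
        PySem.List.slice mel none (some (PySem.Int.mod t (PySem.List.len mel)))
    else PySem.List.slice mel none (some t) := by
  have hL : 0 < mel.length := List.length_pos_iff.mpr hm
  obtain ⟨T, rfl⟩ : ∃ T : Nat, t = (T : Int) := ⟨t.toNat, (Int.toNat_of_nonneg ht).symm⟩
  have hlen : PySem.List.len mel = (mel.length : Int) := PySem.List.len_eq mel
  rw [hlen, PySem.Int.floordiv_natCast, PySem.Int.mod_natCast]
  have e3 : (((T / mel.length : Nat) : Int) + 1) = ((T / mel.length + 1 : Nat) : Int) := by
    push_cast; ring
  rw [e3]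
  simp only [PySem.List.pyRepeat, Int.toNat_natCast, PySem.List.slice_to_natCast]
  rw [played_nat mel T hL]
  by_cases h : mel.length < T
  · rw [if_pos h, if_pos (show (mel.length : Int) < (T : Int) by exact_mod_cast h)]
  · rw [if_neg h, if_neg (show ¬ (mel.length : Int) < (T : Int) by exact_mod_cast h)]

theorem take_two {α : Type} (l : List α) (d : α) (h : 2 ≤ l.length) :
    l.take 2 = [l.getD 0 d, l.getD 1 d] := by
  match l with
  | a :: b :: t => simp [List.getD]
  | [] => simp at h
  | [a] => simp at h

-- stepA succeeds and equals the canonical step under PreInfo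
theorem stepA_eq (info : String) (h : PreInfo info) :
    ∀ d, stepA (some d) info = some (stepT d info) := by
  obtain ⟨h4, h20, h21, s00, s01, s10, s11, hmel⟩ := h
  intro d
  simp only [stepA, stepT, keyOf, valOf]
  set x := PySem.Chars.splitOn info.toList ",".toList with hx
  have c3 : (3 : Int) = ((3 : Nat) : Int) := rfl
  have gx3 : x[(3 : Nat)]? = some (x.getD 3 []) := getElem?_getD x 3 [] (by omega)
  have hset0 : (x.set 3 (subSharpC (x.getD 3 []))).getD 0 [] = x.getD 0 [] := by
    simp [List.getD_eq_getElem?_getD]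
  have hset1 : (x.set 3 (subSharpC (x.getD 3 []))).getD 1 [] = x.getD 1 [] := by
    simp [List.getD_eq_getElem?_getD]
  have hset2 : (x.set 3 (subSharpC (x.getD 3 []))).getD 2 [] = x.getD 2 [] := by
    simp [List.getD_eq_getElem?_getD]
  have hset3 : (x.set 3 (subSharpC (x.getD 3 []))).getD 3 [] = subSharpC (x.getD 3 []) := by
    simp [List.getD_eq_getElem?_getD, show 3 < x.length by omega]
  have hTset : pvT (x.set 3 (subSharpC (x.getD 3 []))) = pvT x := by
    unfold pvT pvF; rw [hset0, hset1]
  have hmt : mTimeA (x.set 3 (subSharpC (x.getD 3 []))) = some (pvT x) := by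
    rw [← hTset]
    exact mTimeA_eq _ (by simp; omega)
      (by rw [hset0]; exact h20) (by rw [hset1]; exact h21)
      (by unfold pvF; rw [hset0]; exact s00) (by unfold pvF; rw [hset0]; exact s01)
      (by unfold pvF; rw [hset1]; exact s10) (by unfold pvF; rw [hset1]; exact s11)
  have c2 : (2 : Int) = ((2 : Nat) : Int) := rfl
  simp only [c3, PySem.List.pyGet?_natCast, gx3, PySem.List.pySetD_natCast, hmt,
    c2, PySem.List.pyGetD_natCast, hset2, hset3]
  by_cases hne : subSharpC (x.getD 3 []) = []
  · have hz : pvT x = 0 := hmel.resolve_left (fun hk => hk hne)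
    rw [hz, hne]
    norm_num [PySem.List.len_eq]
    rfl
  · rw [if_pos hne, played_eq _ (pvT x) hne (pvT_nonneg x)]
    by_cases hgt : pvT x > PySem.List.len (subSharpC (x.getD 3 []))
    · rw [if_pos hgt, if_pos hgt]
      have hlz : PySem.List.len (subSharpC (x.getD 3 [])) ≠ 0 := by
        rw [PySem.List.len_eq]
        exact_mod_cast (List.length_pos_iff.mpr hne).ne'
      simp only [PySem.Int.floordiv?, PySem.Int.mod?, if_neg hlz, PySem.Int.floordiv,
        PySem.Int.mod]
    · rw [if_neg hgt, if_neg hgt]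

theorem stepB_eq (info : String) (h : PreInfo info) :
    ∀ d, stepB (some d) info = some (stepT d info) := by
  obtain ⟨h4, h20, h21, s00, s01, s10, s11, hmel⟩ := h
  intro d
  obtain ⟨a00, e00⟩ := Option.isSome_iff_exists.mp s00
  obtain ⟨a01, e01⟩ := Option.isSome_iff_exists.mp s01
  obtain ⟨a10, e10⟩ := Option.isSome_iff_exists.mp s10
  obtain ⟨a11, e11⟩ := Option.isSome_iff_exists.mp s11
  unfold pvF at e00 e01 e10 e11
  simp only [stepB, stepT, keyOf, valOf]
  set x := PySem.Chars.splitOn info.toList ",".toList with hx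
  have c0 : (0 : Int) = ((0 : Nat) : Int) := rfl
  have c1 : (1 : Int) = ((1 : Nat) : Int) := rfl
  have c2 : (2 : Int) = ((2 : Nat) : Int) := rfl
  have c3 : (3 : Int) = ((3 : Nat) : Int) := rfl
  have gx0 : x[(0 : Nat)]? = some (x.getD 0 []) := getElem?_getD x 0 [] (by omega)
  have gx1 : x[(1 : Nat)]? = some (x.getD 1 []) := getElem?_getD x 1 [] (by omega)
  have gx2 : x[(2 : Nat)]? = some (x.getD 2 []) := getElem?_getD x 2 [] (by omega)
  have gx3 : x[(3 : Nat)]? = some (x.getD 3 []) := getElem?_getD x 3 [] (by omega)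
  have ht0 : (PySem.List.slice (PySem.Chars.splitOn (x.getD 0 []) ":".toList) none (some 2)) =
      [(PySem.Chars.splitOn (x.getD 0 []) ":".toList).getD 0 [],
       (PySem.Chars.splitOn (x.getD 0 []) ":".toList).getD 1 []] := by
    rw [c2, PySem.List.slice_to_natCast, take_two _ [] h20]
  have ht1 : (PySem.List.slice (PySem.Chars.splitOn (x.getD 1 []) ":".toList) none (some 2)) =
      [(PySem.Chars.splitOn (x.getD 1 []) ":".toList).getD 0 [],
       (PySem.Chars.splitOn (x.getD 1 []) ":".toList).getD 1 []] := by
    rw [c2, PySem.List.slice_to_natCast, take_two _ [] h21]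
  have hT : 60 * |a00 - a10| + |a01 - a11| = pvT x := by
    unfold pvT pvF; rw [e00, e01, e10, e11]; rfl
  have gq0 : PySem.List.pyGet? x (0 : Int) = some (x.getD 0 []) := by
    rw [c0, PySem.List.pyGet?_natCast, gx0]
  have gq1 : PySem.List.pyGet? x (1 : Int) = some (x.getD 1 []) := by
    rw [c1, PySem.List.pyGet?_natCast, gx1]
  have gq2 : PySem.List.pyGet? x (2 : Int) = some (x.getD 2 []) := by
    rw [c2, PySem.List.pyGet?_natCast, gx2]
  have gq3 : PySem.List.pyGet? x (3 : Int) = some (x.getD 3 []) := by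
    rw [c3, PySem.List.pyGet?_natCast, gx3]
  simp only [gq0, gq1, gq2, gq3, ht0, ht1, e00, e01, e10, e11, hT]



-- head of an insertion-sort fold is a running minimum
def runBest {α : Type} (bf : α → α → Bool) (o : Option α) (x : α) : Option α :=
  some (o.elim x (fun h => if bf x h then x else h))

theorem head?_foldl_insertBy {α : Type} (bf : α → α → Bool) (xs : List α) (acc : List α) :
    (xs.foldl (fun acc x => PySem.List.insertBy bf x acc) acc).head? =
    xs.foldl (runBest bf) acc.head? := by
  induction xs generalizing acc with
  | nil => rfl
  | cons x xs ih =>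
    simp only [List.foldl_cons]
    rw [ih]
    congr 1
    cases acc with
    | nil => rfl
    | cons h t => cases hbf : bf x h <;> simp [PySem.List.insertBy, runBest, hbf]

-- the answer-collecting loop of A, projected to (title, time)
theorem ansLoop (mC : List Char) (song : PySem.Dict (List Char) (List Char × Int))
    (keys : List (List Char)) (ans : List (List Char × Int × Int)) (cnt : Int) :
    ((keys.foldl (fun (st : List (List Char × Int × Int) × Int) s =>
        (if PySem.Chars.isIn mC s then
            st.1 ++ [((song.getD s ([], 0)).1, (song.getD s ([], 0)).2, st.2)]
          else st.1, st.2 + 1)) (ans, cnt)).1).map (fun e => (e.1, e.2.1)) =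
      ans.map (fun e => (e.1, e.2.1)) ++
        (keys.filter (fun s => PySem.Chars.isIn mC s)).map (fun s => song.getD s ([], 0)) := by
  induction keys generalizing ans cnt with
  | nil => simp
  | cons s ks ih =>
    simp only [List.foldl_cons, List.filter_cons]
    cases h : PySem.Chars.isIn mC s <;> simp only [if_true, if_false, Bool.false_eq_true]
    · rw [ih]
    · rw [ih]; simp

-- A's comparator on answer triples equals B's on the projected pairs
theorem cmp_eq (x h : List Char × Int × Int) :
    (decide (-(x.2.1) < -(h.2.1)) || (!decide (-(h.2.1) < -(x.2.1)) && decide (x.1 < h.1))) = true ↔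
    (h.2.1 < x.2.1 ∨ (x.2.1 = h.2.1 ∧ x.1 < h.1)) := by
  by_cases hc : x.1 < h.1 <;> simp [hc] <;> omega

-- B's best-so-far update, as a total function on the option state
def bestStep (b : Option (List Char × Int)) (v : List Char × Int) : Option (List Char × Int) :=
  some (match b with
    | none => v
    | some h => if h.2 < v.2 ∨ (v.2 = h.2 ∧ v.1 < h.1) then v else h)

theorem bestStep_comm (o : Option (List Char × Int × Int)) (x : List Char × Int × Int) :
    bestStep (Option.map (fun (e : List Char × Int × Int) => (e.1, e.2.1)) o) (x.1, x.2.1) =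
      Option.map (fun (e : List Char × Int × Int) => (e.1, e.2.1))
        (runBest (fun a b => decide (-(a.2.1) < -(b.2.1)) ||
            (!decide (-(b.2.1) < -(a.2.1)) && decide (a.1 < b.1))) o x) := by
  cases o with
  | none => rfl
  | some h =>
    simp only [Option.map_some, bestStep, runBest, Option.elim_some]
    rw [apply_ite (fun (e : List Char × Int × Int) => (e.1, e.2.1))]
    congr 1
    exact if_congr (by simpa using (cmp_eq x h).symm) rfl rfl

theorem map_fold_best (xs : List (List Char × Int × Int)) (o : Option (List Char × Int × Int)) :
    Option.map (fun (e : List Char × Int × Int) => (e.1, e.2.1))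
      (xs.foldl (runBest (fun a b => decide (-(a.2.1) < -(b.2.1)) ||
          (!decide (-(b.2.1) < -(a.2.1)) && decide (a.1 < b.1)))) o) =
    xs.foldl (fun b x => bestStep b (x.1, x.2.1))
      (Option.map (fun (e : List Char × Int × Int) => (e.1, e.2.1)) o) := by
  induction xs generalizing o with
  | nil => rfl
  | cons x xs ih =>
    simp only [List.foldl_cons]
    rw [ih]
    congr 1
    exact (bestStep_comm o x).symm

-- the selection phases agree on any dict with Nodup keys
theorem sel_eq (mC : List Char) (song : PySem.Dict (List Char) (List Char × Int))
    (hnd : song.keys.Nodup) :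
    (match PySem.List.sorted2
        ((song.keys.foldl (fun (st : List (List Char × Int × Int) × Int) s =>
            (if PySem.Chars.isIn mC s then
                st.1 ++ [((song.getD s ([], 0)).1, (song.getD s ([], 0)).2, st.2)]
              else st.1, st.2 + 1)) ([], 0)).1)
        (fun e => -(e.2.1)) (fun e => e.1) with
      | [] => "(None)"
      | e :: _ => String.ofList e.1) =
    (match song.items.foldl
        (fun (b : Option (List Char × Int)) p =>
          if PySem.Chars.isIn mC p.1 then
            match b with
            | none => some p.2
            | some h => if h.2 < p.2.2 ∨ (p.2.2 = h.2 ∧ p.2.1 < h.1) then some p.2 else some h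
          else b) none with
      | none => "(None)"
      | some v => String.ofList v.1) := by
  have main : song.items.foldl
      (fun (b : Option (List Char × Int)) p =>
        if PySem.Chars.isIn mC p.1 then
          match b with
          | none => some p.2
          | some h => if h.2 < p.2.2 ∨ (p.2.2 = h.2 ∧ p.2.1 < h.1) then some p.2 else some h
        else b) none =
      Option.map (fun (e : List Char × Int × Int) => (e.1, e.2.1))
        ((PySem.List.sorted2
          ((song.keys.foldl (fun (st : List (List Char × Int × Int) × Int) s =>
              (if PySem.Chars.isIn mC s then
                  st.1 ++ [((song.getD s ([], 0)).1, (song.getD s ([], 0)).2, st.2)]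
                else st.1, st.2 + 1)) ([], 0)).1)
          (fun e => -(e.2.1)) (fun e => e.1)).head?) := by
    have hs2 : PySem.List.sorted2
        ((song.keys.foldl (fun (st : List (List Char × Int × Int) × Int) s =>
            (if PySem.Chars.isIn mC s then
                st.1 ++ [((song.getD s ([], 0)).1, (song.getD s ([], 0)).2, st.2)]
              else st.1, st.2 + 1)) ([], 0)).1)
        (fun e => -(e.2.1)) (fun e => e.1) =
        ((song.keys.foldl (fun (st : List (List Char × Int × Int) × Int) s =>
            (if PySem.Chars.isIn mC s then
                st.1 ++ [((song.getD s ([], 0)).1, (song.getD s ([], 0)).2, st.2)]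
              else st.1, st.2 + 1)) ([], 0)).1).foldl
          (fun acc x => PySem.List.insertBy
            (fun a b => decide (-(a.2.1) < -(b.2.1)) ||
              (!decide (-(b.2.1) < -(a.2.1)) && decide (a.1 < b.1))) x acc) [] := rfl
    rw [hs2, head?_foldl_insertBy]
    rw [map_fold_best]
    simp only [List.head?_nil, Option.map_none]
    rw [show (fun (b : Option (List Char × Int)) (x : List Char × Int × Int) =>
          bestStep b (x.1, x.2.1)) =
        (fun b x => bestStep b ((fun (e : List Char × Int × Int) => (e.1, e.2.1)) x)) from rfl,
      ← List.foldl_map (f := fun (e : List Char × Int × Int) => (e.1, e.2.1)) (g := bestStep)]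
    rw [ansLoop mC song song.keys [] 0]
    simp only [List.map_nil, List.nil_append]
    rw [List.foldl_map]
    rw [← PySem.List.foldl_if_eq_foldl_filter (fun s => PySem.Chars.isIn mC s)
      (fun b s => bestStep b (song.getD s ([], 0)))]
    rw [PySem.Dict.items_eq_map_keys song hnd ([], 0), List.foldl_map]
    apply PySem.List.foldl_congr_mem
    intro b s _
    simp only
    by_cases hin : PySem.Chars.isIn mC s
    · rw [if_pos hin, if_pos hin]
      cases b with
      | none => rfl
      | some h =>
        simp only [bestStep]
        rw [apply_ite some]
    · rw [if_neg hin, if_neg hin]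
  rw [main]
  cases hs : PySem.List.sorted2
      ((song.keys.foldl (fun (st : List (List Char × Int × Int) × Int) s =>
          (if PySem.Chars.isIn mC s then
              st.1 ++ [((song.getD s ([], 0)).1, (song.getD s ([], 0)).2, st.2)]
            else st.1, st.2 + 1)) ([], 0)).1)
      (fun e => -(e.2.1)) (fun e => e.1) with
  | nil => rfl
  | cons e t => rfl

theorem pre_to_preInfo {m : String} {musicinfos : List String}
    (h : Pre_solution m musicinfos) : ∀ info ∈ musicinfos, PreInfo info :=
  fun info hi => h info hi

-- ===== VERDICT (by name: the statement is the Claim_ definition above) =====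
theorem solution_spec : Claim_equal_solution := by
  intro m musicinfos _ hpre
  unfold Spec_solution
  have hA : musicinfos.foldl stepA (some PySem.Dict.empty) =
      some (musicinfos.foldl stepT PySem.Dict.empty) :=
    foldl_option_some stepA stepT musicinfos
      (fun info hi d => stepA_eq info (pre_to_preInfo hpre info hi) d) _
  have hB : musicinfos.foldl stepB (some PySem.Dict.empty) =
      some (musicinfos.foldl stepT PySem.Dict.empty) :=
    foldl_option_some stepB stepT musicinfos
      (fun info hi d => stepB_eq info (pre_to_preInfo hpre info hi) d) _
  have hnd : (musicinfos.foldl stepT PySem.Dict.empty).keys.Nodup := by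
    have heq : (fun (d : PySem.Dict (List Char) (List Char × Int)) info =>
        d.insert (keyOf info) ((fun (_ : PySem.Dict (List Char) (List Char × Int)) i => valOf i)
          d info)) = stepT := rfl
    rw [← heq]
    exact PySem.Dict.nodup_keys_foldl_insert_key musicinfos keyOf _ PySem.Dict.empty
      PySem.Dict.nodup_keys_empty
  simp only [solution, solution_alt, hA, hB]
  exact sel_eq (subSharpC m.toList) (musicinfos.foldl stepT PySem.Dict.empty) hnd
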